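-- pv_equiv track=rewrite | github.com/Onnesok/cse221_spring_2024 | Lab7/task1/task1.py | friend_circle_size
-- ===== SOURCE A (Python) =====
-- def find(parent, i):
--     if parent[i] == i:
--         return i
--     parent[i] = find(parent, parent[i])
--     return parent[i]
--
-- def union(parent, size, x, y):
--     root_x = find(parent, x)
--     root_y = find(parent, y)
--     if root_x != root_y:
--         if size[root_x] < size[root_y]:
--             root_x, root_y = root_y, root_x
--         parent[root_y] = root_x
--         size[root_x] += size[root_y]
--         return size[root_x]
--     return size[root_x]
--
-- def friend_circle_size(N, K, queries):
--     parent = [i for i in range(N)]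
--     size = [1] * N
--     result = []
--     for query in queries:
--         A, B = query
--         result.append(union(parent, size, A - 1, B - 1))
--     return result
-- ===== SOURCE B (Python) =====
-- def friend_circle_size(N, K, queries):
--     # quick-find: lab[i] is the representative of i's circle; merge by relabeling
--     # the smaller circle (union by size), no parent forest and no recursion
--     lab = list(range(N))
--     sz = [1] * N
--     out = []
--     for a, b in queries:
--         ra = lab[a - 1]
--         rb = lab[b - 1]
--         if ra == rb:
--             out.append(sz[ra])
--         else:
--             if sz[ra] < sz[rb]:
--                 ra, rb = rb, ra
--             sz[ra] += sz[rb]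
--             lab = [ra if x == rb else x for x in lab]
--             out.append(sz[ra])
--     return out
-- ===== Notes on version B (the rewrite author's own statement) =====
-- stated objective: alternative
-- what changed: Replaces A's union-find forest (recursive find with path compression + union by size) by a quick-find: a flat label array that is eagerly relabelled at every merge (smaller circle relabelled, sizes kept in a parallel array), so there is no parent forest, no recursion and no helper functions.
import Mathlib
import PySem

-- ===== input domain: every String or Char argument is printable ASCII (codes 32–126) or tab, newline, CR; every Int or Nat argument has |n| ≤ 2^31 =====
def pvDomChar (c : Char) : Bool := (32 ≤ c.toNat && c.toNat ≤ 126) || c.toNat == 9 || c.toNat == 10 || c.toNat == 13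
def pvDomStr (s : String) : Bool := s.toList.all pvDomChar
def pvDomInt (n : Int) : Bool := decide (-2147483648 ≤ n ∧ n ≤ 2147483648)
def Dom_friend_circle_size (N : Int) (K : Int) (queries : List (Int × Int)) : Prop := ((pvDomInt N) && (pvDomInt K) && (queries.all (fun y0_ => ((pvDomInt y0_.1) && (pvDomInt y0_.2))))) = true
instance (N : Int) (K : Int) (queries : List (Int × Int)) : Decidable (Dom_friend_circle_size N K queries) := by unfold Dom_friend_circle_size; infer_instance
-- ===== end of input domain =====

-- B replaces A's union-find forest (recursive find with path compression) by a
-- quick-find: a flat label array relabelled eagerly at each merge — no forest,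
-- no recursion, no helper functions (objective: alternative decomposition, not speed).
-- A mutates no caller-visible data (parent/size are locals), so return-value
-- equivalence is the whole behaviour.

-- ===== PORT A =====
-- find(parent, i): recursive path compression.  The recursion is bounded by a
-- fuel argument (the callers pass parent's length); under Pre_ the parent chain
-- never revisits a node, so fuel never runs out and the 0-fuel branch is dead.
def pvFindA : Nat → List Int → Int → List Int × Int
  | 0, p, i => (p, i)
  | fuel+1, p, i =>
    (PySem.List.pyGet? p i).elim (p, i) (fun pi =>   -- none = IndexError in Python; excluded by Pre_
      if pi = i then (p, i)
      else
        let r := pvFindA fuel p pi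
        -- parent[i] = find(parent, parent[i]); return parent[i]  (the re-read
        -- of parent[i] after the write is exactly the written root r.2)
        (PySem.List.pySetD r.1 i r.2, r.2))

-- union(parent, size, x, y); returns (parent, size, returned value)
def pvUnionA (p : List Int) (s : List Int) (x : Int) (y : Int) : List Int × List Int × Int :=
  let f1 := pvFindA p.length p x
  let f2 := pvFindA f1.1.length f1.1 y
  let rx := f1.2
  let ry := f2.2
  if rx ≠ ry then
    -- size reads use default 0: Python raises there, excluded by Pre_
    let rx' := if PySem.List.pyGetD s rx 0 < PySem.List.pyGetD s ry 0 then ry else rx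
    let ry' := if PySem.List.pyGetD s rx 0 < PySem.List.pyGetD s ry 0 then rx else ry
    let p3 := PySem.List.pySetD f2.1 ry' rx'
    let s1 := PySem.List.pySetD s rx' (PySem.List.pyGetD s rx' 0 + PySem.List.pyGetD s ry' 0)
    (p3, s1, PySem.List.pyGetD s1 rx' 0)
  else (f2.1, s, PySem.List.pyGetD s rx 0)

-- one iteration of A's result loop: state = (parent, size, result)
def pvStepA (st : List Int × List Int × List Int) (q : Int × Int) : List Int × List Int × List Int :=
  let u := pvUnionA st.1 st.2.1 (q.1 - 1) (q.2 - 1)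
  (u.1, u.2.1, st.2.2 ++ [u.2.2])

def friend_circle_size (N : Int) (K : Int) (queries : List (Int × Int)) : List Int :=
  (queries.foldl pvStepA (PySem.List.pyRange 0 N 1, List.replicate N.toNat 1, [])).2.2

-- ===== PORT B =====
-- one iteration of B's loop: state = (lab, sz, out)
def pvStepB (st : List Int × List Int × List Int) (q : Int × Int) : List Int × List Int × List Int :=
  let ra := PySem.List.pyGetD st.1 (q.1 - 1) 0   -- default 0: Python raises there, excluded by Pre_
  let rb := PySem.List.pyGetD st.1 (q.2 - 1) 0
  if ra = rb then (st.1, st.2.1, st.2.2 ++ [PySem.List.pyGetD st.2.1 ra 0])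
  else
    let ra' := if PySem.List.pyGetD st.2.1 ra 0 < PySem.List.pyGetD st.2.1 rb 0 then rb else ra
    let rb' := if PySem.List.pyGetD st.2.1 ra 0 < PySem.List.pyGetD st.2.1 rb 0 then ra else rb
    let sz' := PySem.List.pySetD st.2.1 ra' (PySem.List.pyGetD st.2.1 ra' 0 + PySem.List.pyGetD st.2.1 rb' 0)
    let lab' := st.1.map (fun v => if v = rb' then ra' else v)
    (lab', sz', st.2.2 ++ [PySem.List.pyGetD sz' ra' 0])

def friend_circle_size_alt (N : Int) (K : Int) (queries : List (Int × Int)) : List Int :=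
  (queries.foldl pvStepB (PySem.List.pyRange 0 N 1, List.replicate N.toNat 1, [])).2.2

-- ===== PRECONDITION & SPEC =====
-- Pre_ excludes exactly the queries on which Python's A raises an IndexError
-- (a member index outside [-N, N) after the `- 1`, i.e. a coordinate outside [1-N, N]).
def Pre_friend_circle_size (N : Int) (K : Int) (queries : List (Int × Int)) : Prop :=
  ∀ q ∈ queries, (1 - N ≤ q.1 ∧ q.1 ≤ N) ∧ (1 - N ≤ q.2 ∧ q.2 ≤ N)
instance (N : Int) (K : Int) (queries : List (Int × Int)) : Decidable (Pre_friend_circle_size N K queries) := by unfold Pre_friend_circle_size; infer_instance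

def pvWitness_friend_circle_size : Int × Int × (List (Int × Int)) := (3, 3, [(1, 2), (2, 3), (1, 3)])

def Spec_friend_circle_size (N : Int) (K : Int) (queries : List (Int × Int)) (out : List Int) : Prop := out = friend_circle_size_alt N K queries
instance (N : Int) (K : Int) (queries : List (Int × Int)) (out : List Int) : Decidable (Spec_friend_circle_size N K queries out) := by unfold Spec_friend_circle_size; infer_instance

-- ===== CLAIM (what is proved, stated in full; the proofs are below) =====
def Claim_equal_friend_circle_size : Prop := ∀ (N : Int) (K : Int) (queries : List (Int × Int)), Dom_friend_circle_size N K queries → Pre_friend_circle_size N K queries → Spec_friend_circle_size N K queries (friend_circle_size N K queries)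

-- ===== LEMMAS AND PROOFS =====

-- The union-find invariant.  `lab j` is the representative of j's component
-- (B's label), `d` a depth measure for A's parent forest `p`, `s` the sizes.
structure pvUF (p : List Int) (s : List Int) (lab : Nat → Nat) (d : Nat → Nat) (n : Nat) : Prop where
  lenp : p.length = n
  lens : s.length = n
  pmem : ∀ j < n, 0 ≤ p.getD j 0 ∧ p.getD j 0 < (n : Int)
  pcomp : ∀ j < n, lab (p.getD j 0).toNat = lab j
  labmem : ∀ j < n, lab j < n
  labidem : ∀ j < n, lab (lab j) = lab j
  rootfix : ∀ j < n, p.getD (lab j) 0 = ((lab j : Nat) : Int)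
  rootlab : ∀ j < n, p.getD j 0 = (j : Int) → lab j = j
  dstep : ∀ j < n, p.getD j 0 ≠ (j : Int) → d (p.getD j 0).toNat < d j
  droot : ∀ j < n, lab j = j → d j = 0
  dbound : ∀ j < n, d j < (s.getD (lab j) 0).toNat

-- total size stored at the roots
def pvRootSum (p : List Int) (s : List Int) (n : Nat) : Nat :=
  ∑ j ∈ Finset.range n, if p.getD j 0 = (j : Int) then (s.getD j 0).toNat else 0

def pvInv (p : List Int) (s : List Int) (lab : Nat → Nat) (d : Nat → Nat) (n : Nat) : Prop :=
  pvUF p s lab d n ∧ pvRootSum p s n = n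

-- B's label list determined by lab
def pvLabList (lab : Nat → Nat) (n : Nat) : List Int :=
  (List.range n).map (fun j => ((lab j : Nat) : Int))

-- normalised index of a Python index x with -n ≤ x < n
def pvNorm (x : Int) (n : Nat) : Nat := (if x < 0 then x + n else x).toNat

-- depth/label updates used by the proofs
def pvDmin (d : Nat → Nat) (j : Nat) : Nat → Nat := fun x => if x = j then min (d x) 1 else d x
def pvRelab (lab : Nat → Nat) (ra rb : Nat) : Nat → Nat := fun z => if lab z = rb then ra else lab z
def pvDmerge (d : Nat → Nat) (lab : Nat → Nat) (rb : Nat) : Nat → Nat :=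
  fun z => if lab z = rb then d z + 1 else d z
-- helper: getD after set
theorem pv_getD_set (l : List Int) (j : Nat) (v : Int) (x : Nat) (hj : j < l.length) :
    (l.set j v).getD x 0 = if x = j then v else l.getD x 0 := by
  by_cases hxj : x = j
  · subst hxj
    rw [List.getD_eq_getElem _ _ (by simpa using hj), List.getElem_set_self, if_pos rfl]
  · rw [if_neg hxj]
    rcases Nat.lt_or_ge x l.length with hx | hx
    · rw [List.getD_eq_getElem _ _ (by simpa using hx), List.getD_eq_getElem _ _ hx,
        List.getElem_set_ne (fun h => hxj h.symm)]
    · rw [List.getD_eq_default _ _ (by simpa using hx), List.getD_eq_default _ _ hx]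

-- helper: reading pvLabList inside range
theorem pv_labList_getD (lab : Nat → Nat) (n : Nat) (j : Nat) (hj : j < n) :
    (pvLabList lab n).getD j 0 = ((lab j : Nat) : Int) := by
  unfold pvLabList
  rw [List.getD_eq_getElem _ _ (by simpa using hj)]
  simp

theorem pv_labList_length (lab : Nat → Nat) (n : Nat) : (pvLabList lab n).length = n := by
  simp [pvLabList]

-- sums are preserved when entries only move to their own root
theorem pv_rootSum_congr {p p' s : List Int} {lab d : Nat → Nat} {n : Nat}
    (h : pvUF p s lab d n)
    (hch : ∀ x < n, p'.getD x 0 = p.getD x 0 ∨ p'.getD x 0 = ((lab x : Nat) : Int)) :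
    pvRootSum p' s n = pvRootSum p s n := by
  unfold pvRootSum
  refine Finset.sum_congr rfl ?_
  intro x hx
  have hx' : x < n := Finset.mem_range.mp hx
  rcases hch x hx' with he | he
  · rw [he]
  · rw [he]
    by_cases hr : lab x = x
    · have hp : p.getD x 0 = (x : Int) := by
        have := h.rootfix x hx'; rwa [hr] at this
      have hc : ((lab x : Nat) : Int) = (x : Int) := by exact_mod_cast hr
      rw [hp, hc]
    · have h1 : ¬ (((lab x : Nat) : Int) = (x : Int)) := by
        intro hh; exact hr (by exact_mod_cast hh)
      have h2 : ¬ (p.getD x 0 = (x : Int)) := fun hh => hr (h.rootlab x hx' hh)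
      rw [if_neg h1, if_neg h2]

-- writing `lab j` into slot j keeps the invariant (path compression step)
theorem pv_compress {p s : List Int} {lab d : Nat → Nat} {n : Nat}
    (h : pvUF p s lab d n) (j : Nat) (hj : j < n) :
    ∃ d', pvUF (p.set j ((lab j : Nat) : Int)) s lab d' n ∧ (∀ x, d' x ≤ d x) := by
  have hjl : j < p.length := h.lenp ▸ hj
  have G : ∀ x : Nat, (p.set j ((lab j : Nat) : Int)).getD x 0
      = if x = j then ((lab j : Nat) : Int) else p.getD x 0 := fun x => pv_getD_set p j _ x hjl
  by_cases hroot : p.getD j 0 = (j : Int)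
  · -- j is already a root: the write stores the value already there
    have hlj : lab j = j := h.rootlab j hj hroot
    have hset : p.set j ((lab j : Nat) : Int) = p := by
      apply List.ext_getElem (by simp)
      intro i h1 h2
      by_cases hij : i = j
      · subst hij
        rw [List.getElem_set_self]
        have hgi : p.getD i 0 = p[i] := List.getD_eq_getElem p 0 h2
        rw [hlj]; omega
      · rw [List.getElem_set_ne (fun hh => hij hh.symm)]
    rw [hset]
    exact ⟨d, h, fun _ => le_rfl⟩
  · have hlj : lab j ≠ j := by
      intro hh
      apply hroot
      have := h.rootfix j hj
      rw [hh] at this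
      exact this
    have hdj : 1 ≤ d j := by
      have := h.dstep j hj hroot; omega
    have hlabj : lab j < n := h.labmem j hj
    have hlabidem : lab (lab j) = lab j := h.labidem j hj
    refine ⟨pvDmin d j, ?_, ?_⟩
    · constructor
      · simp [h.lenp]
      · exact h.lens
      · intro x hx; rw [G x]
        by_cases hxj : x = j
        · rw [if_pos hxj]
          exact ⟨Int.natCast_nonneg _, by exact_mod_cast hlabj⟩
        · rw [if_neg hxj]; exact h.pmem x hx
      · intro x hx; rw [G x]
        by_cases hxj : x = j
        · rw [if_pos hxj]
          simp only [Int.toNat_natCast]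
          rw [hlabidem, hxj]
        · rw [if_neg hxj]; exact h.pcomp x hx
      · exact h.labmem
      · exact h.labidem
      · intro x hx; rw [G (lab x)]
        by_cases hlx : lab x = j
        · rw [if_pos hlx, hlx]
          have hxx : lab j = lab x := by
            conv_rhs => rw [← h.labidem x hx, hlx]
          rw [hxx, hlx]
        · rw [if_neg hlx]; exact h.rootfix x hx
      · intro x hx hfix; rw [G x] at hfix
        by_cases hxj : x = j
        · exfalso; rw [if_pos hxj, hxj] at hfix
          exact hlj (by exact_mod_cast hfix)
        · rw [if_neg hxj] at hfix; exact h.rootlab x hx hfix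
      · intro x hx hne
        rw [G x] at hne ⊢
        simp only [pvDmin]
        by_cases hxj : x = j
        · rw [if_pos hxj] at hne ⊢
          rw [if_pos hxj]
          simp only [Int.toNat_natCast]
          rw [if_neg hlj, h.droot (lab j) hlabj hlabidem, hxj]
          omega
        · rw [if_neg hxj] at hne ⊢
          rw [if_neg hxj]
          have hlt := h.dstep x hx hne
          by_cases hpj : (p.getD x 0).toNat = j
          · rw [if_pos hpj]
            omega
          · rw [if_neg hpj]; exact hlt
      · intro x hx hlx
        simp only [pvDmin]
        by_cases hxj : x = j
        · exact absurd (hxj ▸ hlx) hlj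
        · rw [if_neg hxj]; exact h.droot x hx hlx
      · intro x hx
        simp only [pvDmin]
        have := h.dbound x hx
        by_cases hxj : x = j
        · rw [if_pos hxj]; omega
        · rw [if_neg hxj]; exact this
    · intro x
      simp only [pvDmin]
      by_cases hxj : x = j
      · rw [if_pos hxj]; omega
      · rw [if_neg hxj]

-- a find starting at a root returns immediately, whatever the fuel
theorem pv_find_root (fuel : Nat) (p : List Int) (j : Nat) (hj : j < p.length)
    (hr : p.getD j 0 = (j : Int)) : pvFindA fuel p (j : Int) = (p, (j : Int)) := by
  cases fuel with
  | zero => rfl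
  | succ f =>
    have hget : PySem.List.pyGet? p ((j : Nat) : Int) = some ((j : Nat) : Int) := by
      rw [PySem.List.pyGet?_natCast, List.getElem?_eq_getElem hj]
      rw [List.getD_eq_getElem p 0 hj] at hr
      rw [hr]
    simp [pvFindA, hget]

-- find with enough fuel returns the root and compresses along its own path
theorem pv_find_spec {n : Nat} (fuel : Nat) :
    ∀ (p s : List Int) (lab d : Nat → Nat) (j : Nat), pvUF p s lab d n → j < n → d j < fuel →
    ∃ p' d', pvFindA fuel p (j : Int) = (p', ((lab j : Nat) : Int)) ∧ pvUF p' s lab d' n ∧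
      (∀ x, d' x ≤ d x) ∧
      (∀ x < n, p'.getD x 0 = p.getD x 0 ∨ p'.getD x 0 = ((lab x : Nat) : Int)) := by
  induction fuel with
  | zero => intro p s lab d j h hj hf; omega
  | succ f ih =>
    intro p s lab d j h hj hf
    have hjl : j < p.length := h.lenp ▸ hj
    have hget : PySem.List.pyGet? p ((j : Nat) : Int) = some (p.getD j 0) := by
      rw [PySem.List.pyGet?_natCast, List.getElem?_eq_getElem hjl, List.getD_eq_getElem p 0 hjl]
    by_cases hroot : p.getD j 0 = (j : Int)
    · have hlj : lab j = j := h.rootlab j hj hroot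
      refine ⟨p, d, ?_, h, fun _ => le_rfl, fun x _ => Or.inl rfl⟩
      rw [pv_find_root (f+1) p j hjl hroot, hlj]
    · have hmem := h.pmem j hj
      have hpin : (p.getD j 0).toNat < n := by omega
      have hdlt : d (p.getD j 0).toNat < f := by
        have := h.dstep j hj hroot; omega
      obtain ⟨p1, d1, heq, h1, hle1, hch1⟩ := ih p s lab d (p.getD j 0).toNat h hpin hdlt
      have hcast : (((p.getD j 0).toNat : Nat) : Int) = p.getD j 0 := Int.toNat_of_nonneg hmem.1
      have hrec : pvFindA f p (p.getD j 0) = (p1, ((lab (p.getD j 0).toNat : Nat) : Int)) := by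
        rw [← hcast]; exact heq
      have hlabpi : lab (p.getD j 0).toNat = lab j := h.pcomp j hj
      obtain ⟨d2, h2, hle2⟩ := pv_compress h1 j hj
      refine ⟨p1.set j ((lab j : Nat) : Int), d2, ?_, h2,
        fun x => le_trans (hle2 x) (hle1 x), ?_⟩
      · simp only [pvFindA]
        rw [hget]
        simp only [Option.elim_some]
        rw [if_neg hroot]
        simp only [hrec]
        rw [hlabpi, PySem.List.pySetD_natCast]
      · intro x hx
        have hjl1 : j < p1.length := h1.lenp ▸ hj
        rw [pv_getD_set p1 j _ x hjl1]
        by_cases hxj : x = j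
        · rw [if_pos hxj, hxj]; exact Or.inr rfl
        · rw [if_neg hxj]; exact hch1 x hx

-- the depth is bounded by n under the size-sum invariant
theorem pv_size_le {p s : List Int} {lab d : Nat → Nat} {n : Nat}
    (h : pvUF p s lab d n) (hsum : pvRootSum p s n = n) (j : Nat) (hj : j < n) :
    d j < n := by
  have hb := h.dbound j hj
  have hr : lab j < n := h.labmem j hj
  have hfix := h.rootfix j hj
  have hterm := Finset.single_le_sum
      (f := fun x => if p.getD x 0 = (x : Int) then (s.getD x 0).toNat else 0)
      (fun i _ => Nat.zero_le _) (Finset.mem_range.mpr hr)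
  have hterm' : (if p.getD (lab j) 0 = ((lab j : Nat) : Int) then (s.getD (lab j) 0).toNat else 0)
      ≤ ∑ x ∈ Finset.range n, (if p.getD x 0 = (x : Int) then (s.getD x 0).toNat else 0) := hterm
  rw [hfix, if_pos rfl] at hterm'
  unfold pvRootSum at hsum
  omega

-- total write with a valid negative index
theorem pv_pySetD_neg_natCast (xs : List Int) (v : Int) (k : Nat) (h1 : 0 < k)
    (h2 : k ≤ xs.length) :
    PySem.List.pySetD xs (-(k : Int)) v = xs.set (xs.length - k) v := by
  unfold PySem.List.pySetD PySem.List.pySet? PySem.List.pyIdx?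
  have hx : ¬ ((-(k : Int)) ≥ 0) := by omega
  simp only [hx, if_false]
  split <;> simp_all

theorem pv_pySetD_neg (xs : List Int) (x v : Int) (h1 : -(xs.length : Int) ≤ x) (h2 : x < 0) :
    PySem.List.pySetD xs x v = xs.set (x + xs.length).toNat v := by
  have hk1 : 0 < (-x).toNat := by omega
  have hk2 : (-x).toNat ≤ xs.length := by omega
  have hxe : x = -(((-x).toNat : Nat) : Int) := by omega
  have hidx : xs.length - (-x).toNat = (x + xs.length).toNat := by omega
  conv_lhs => rw [hxe]
  rw [pv_pySetD_neg_natCast xs v _ hk1 hk2, hidx]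

-- total read with a valid (possibly negative) index, in terms of pvNorm
theorem pv_pyGetD_valid (xs : List Int) (x : Int) (h1 : -(xs.length : Int) ≤ x)
    (h2 : x < xs.length) :
    PySem.List.pyGetD xs x 0 = xs.getD (pvNorm x xs.length) 0 := by
  unfold pvNorm
  by_cases hx : x < 0
  · rw [if_pos hx]
    have hk1 : 0 < (-x).toNat := by omega
    have hk2 : (-x).toNat ≤ xs.length := by omega
    have hxe : x = -(((-x).toNat : Nat) : Int) := by omega
    have hidx : xs.length - (-x).toNat = (x + xs.length).toNat := by omega
    conv_lhs => rw [hxe]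
    rw [PySem.List.pyGetD_neg_natCast xs _ 0 hk1 hk2,
      ← List.getD_eq_getElem xs 0 (show xs.length - (-x).toNat < xs.length by omega), hidx]
  · rw [if_neg hx]
    rw [PySem.List.pyGetD_eq_getElem xs 0 (by omega) h2,
      List.getD_eq_getElem _ 0 (by omega)]
-- find on any valid (possibly negative) Python index, fuel = length
theorem pv_find_valid {n : Nat} {p s : List Int} {lab d : Nat → Nat} (x : Int)
    (h : pvUF p s lab d n) (hsum : pvRootSum p s n = n)
    (hx : -(n : Int) ≤ x ∧ x < n) :
    ∃ p' d', pvFindA p.length p x = (p', ((lab (pvNorm x n) : Nat) : Int)) ∧ pvUF p' s lab d' n ∧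
      (∀ z, d' z ≤ d z) ∧
      (∀ z < n, p'.getD z 0 = p.getD z 0 ∨ p'.getD z 0 = ((lab z : Nat) : Int)) := by
  have hlen : p.length = n := h.lenp
  by_cases hneg : x < 0
  · -- negative index: the first access wraps to (x + n)
    have hn1 : 1 ≤ n := by omega
    have hjx : (x + n).toNat < n := by omega
    have hnorm : pvNorm x n = (x + n).toNat := by unfold pvNorm; rw [if_pos hneg]
    have hjl : (x + n).toNat < p.length := by omega
    have hget : PySem.List.pyGet? p x = some (p.getD (x + n).toNat 0) := by
      have hk1 : 0 < (-x).toNat := by omega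
      have hk2 : (-x).toNat ≤ p.length := by omega
      have hxe : x = -(((-x).toNat : Nat) : Int) := by omega
      have hidx : p.length - (-x).toNat = (x + n).toNat := by omega
      conv_lhs => rw [hxe]
      rw [PySem.List.pyGet?_neg_natCast p _ hk1 hk2, hidx,
        List.getElem?_eq_getElem (by omega), List.getD_eq_getElem p 0 (by omega)]
    obtain ⟨m, hm⟩ : ∃ m, p.length = m + 1 := ⟨p.length - 1, by omega⟩
    have hpix := h.pmem (x + n).toNat hjx
    have hne : ¬ (p.getD (x + n).toNat 0 = x) := by omega
    rw [hnorm, hm]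
    by_cases hroot : p.getD (x + n).toNat 0 = (((x + n).toNat : Nat) : Int)
    · have hlj : lab (x + n).toNat = (x + n).toNat := h.rootlab _ hjx hroot
      have hrec : pvFindA m p (p.getD (x + n).toNat 0) = (p, p.getD (x + n).toNat 0) := by
        rw [hroot]; exact pv_find_root m p _ hjl hroot
      obtain ⟨d2, h2, hle2⟩ := pv_compress h (x + n).toNat hjx
      refine ⟨p.set (x + n).toNat ((lab (x + n).toNat : Nat) : Int), d2, ?_, h2, hle2, ?_⟩
      · simp only [pvFindA]
        rw [hget]
        simp only [Option.elim_some]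
        rw [if_neg hne]
        simp only [hrec]
        rw [pv_pySetD_neg p x _ (by omega) hneg]
        have hidx2 : (x + (p.length : Int)).toNat = (x + n).toNat := by omega
        rw [hidx2, hroot, hlj]
      · intro z hz
        rw [pv_getD_set p _ _ z hjl]
        by_cases hzj : z = (x + n).toNat
        · rw [if_pos hzj, hzj]; exact Or.inr rfl
        · rw [if_neg hzj]; exact Or.inl rfl
    · have hpin : (p.getD (x + n).toNat 0).toNat < n := by omega
      have hdx : d (x + n).toNat < n := pv_size_le h hsum _ hjx
      have hdlt : d (p.getD (x + n).toNat 0).toNat < m := by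
        have := h.dstep _ hjx hroot; omega
      obtain ⟨p1, d1, heq, h1, hle1, hch1⟩ :=
        pv_find_spec (n := n) m p s lab d (p.getD (x + n).toNat 0).toNat h hpin hdlt
      have hcast : (((p.getD (x + n).toNat 0).toNat : Nat) : Int) = p.getD (x + n).toNat 0 :=
        Int.toNat_of_nonneg hpix.1
      have hrec : pvFindA m p (p.getD (x + n).toNat 0)
          = (p1, ((lab (p.getD (x + n).toNat 0).toNat : Nat) : Int)) := by
        rw [← hcast]; exact heq
      have hlabpi : lab (p.getD (x + n).toNat 0).toNat = lab (x + n).toNat := h.pcomp _ hjx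
      obtain ⟨d2, h2, hle2⟩ := pv_compress h1 (x + n).toNat hjx
      have hjl1 : (x + n).toNat < p1.length := h1.lenp ▸ hjx
      refine ⟨p1.set (x + n).toNat ((lab (x + n).toNat : Nat) : Int), d2, ?_, h2,
        fun z => le_trans (hle2 z) (hle1 z), ?_⟩
      · simp only [pvFindA]
        rw [hget]
        simp only [Option.elim_some]
        rw [if_neg hne]
        simp only [hrec]
        rw [hlabpi, pv_pySetD_neg p1 x _ (by rw [h1.lenp]; omega) hneg]
        have hidx2 : (x + (p1.length : Int)).toNat = (x + n).toNat := by
          have := h1.lenp; omega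
        rw [hidx2]
      · intro z hz
        rw [pv_getD_set p1 _ _ z hjl1]
        by_cases hzj : z = (x + n).toNat
        · rw [if_pos hzj, hzj]; exact Or.inr rfl
        · rw [if_neg hzj]; exact hch1 z hz
  · -- nonnegative index
    have hjx : x.toNat < n := by omega
    have hnorm : pvNorm x n = x.toNat := by unfold pvNorm; rw [if_neg hneg]
    have hxe : x = ((x.toNat : Nat) : Int) := by omega
    rw [hnorm, hlen, hxe]
    exact pv_find_spec (n := n) n p s lab d x.toNat h hjx (pv_size_le h hsum _ hjx)

-- reading B's label list at a valid Python index
theorem pv_lab_read {lab : Nat → Nat} {n : Nat} (x : Int) (hx : -(n : Int) ≤ x ∧ x < n) :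
    PySem.List.pyGetD (pvLabList lab n) x 0 = ((lab (pvNorm x n) : Nat) : Int) := by
  have hlen : (pvLabList lab n).length = n := pv_labList_length lab n
  have hnlt : pvNorm x n < n := by unfold pvNorm; split <;> omega
  have hv := pv_pyGetD_valid (pvLabList lab n) x (by rw [hlen]; omega) (by rw [hlen]; omega)
  rw [hlen] at hv
  rw [hv, pv_labList_getD lab n _ hnlt]
-- merging root rb under root ra keeps the invariant, with relabelled lab
theorem pv_merge {n : Nat} {p2 s : List Int} {lab d2 : Nat → Nat}
    (h : pvUF p2 s lab d2 n) (ra rb : Nat)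
    (hraroot : lab ra = ra) (hrbroot : lab rb = rb)
    (hra : ra < n) (hrb : rb < n) (hne : ra ≠ rb) :
    pvUF (p2.set rb ((ra : Nat) : Int)) (s.set ra (s.getD ra 0 + s.getD rb 0))
      (pvRelab lab ra rb) (pvDmerge d2 lab rb) n := by
  have hrbl : rb < p2.length := h.lenp ▸ hrb
  have hras : ra < s.length := h.lens ▸ hra
  have G3 : ∀ z : Nat, (p2.set rb ((ra : Nat) : Int)).getD z 0
      = if z = rb then ((ra : Nat) : Int) else p2.getD z 0 := fun z => pv_getD_set p2 rb _ z hrbl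
  have GS : ∀ z : Nat, (s.set ra (s.getD ra 0 + s.getD rb 0)).getD z 0
      = if z = ra then s.getD ra 0 + s.getD rb 0 else s.getD z 0 := fun z =>
    pv_getD_set s ra _ z hras
  have hsa : 1 ≤ s.getD ra 0 := by
    have := h.dbound ra hra; rw [hraroot] at this; omega
  have hsb : 1 ≤ s.getD rb 0 := by
    have := h.dbound rb hrb; rw [hrbroot] at this; omega
  have hfra : p2.getD ra 0 = ((ra : Nat) : Int) := by
    have := h.rootfix ra hra; rwa [hraroot] at this
  have hdra : d2 ra = 0 := h.droot ra hra hraroot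
  have hdrb : d2 rb = 0 := h.droot rb hrb hrbroot
  constructor
  · simp [h.lenp]
  · simp [h.lens]
  · intro z hz; rw [G3 z]
    by_cases hzrb : z = rb
    · rw [if_pos hzrb]
      exact ⟨Int.natCast_nonneg _, by exact_mod_cast hra⟩
    · rw [if_neg hzrb]; exact h.pmem z hz
  · intro z hz
    simp only [pvRelab]
    rw [G3 z]
    by_cases hzrb : z = rb
    · rw [if_pos hzrb, hzrb]
      simp only [Int.toNat_natCast]
      rw [hraroot, hrbroot]
      simp [hne]
    · rw [if_neg hzrb]
      rw [h.pcomp z hz]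
  · intro z hz
    simp only [pvRelab]
    split
    · exact hra
    · exact h.labmem z hz
  · intro z hz
    simp only [pvRelab]
    by_cases hzrb : lab z = rb
    · simp only [if_pos hzrb]
      rw [hraroot]
      simp [hne]
    · simp only [if_neg hzrb]
      rw [h.labidem z hz]
      simp only [if_neg hzrb]
  · intro z hz
    simp only [pvRelab]
    by_cases hzrb : lab z = rb
    · simp only [if_pos hzrb]
      rw [G3 ra, if_neg hne, hfra]
    · simp only [if_neg hzrb]
      rw [G3 (lab z), if_neg hzrb]
      exact h.rootfix z hz
  · intro z hz hfix
    rw [G3 z] at hfix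
    simp only [pvRelab]
    by_cases hzrb : z = rb
    · rw [if_pos hzrb] at hfix
      exfalso
      apply hne
      have hv : ra = z := by exact_mod_cast hfix
      omega
    · rw [if_neg hzrb] at hfix
      have hlz := h.rootlab z hz hfix
      rw [hlz]
      rw [if_neg (show ¬ (z = rb) from hlz ▸ hzrb)]
  · intro z hz hne3
    rw [G3 z] at hne3 ⊢
    simp only [pvDmerge]
    by_cases hzrb : z = rb
    · rw [if_pos hzrb] at hne3
      simp only [if_pos hzrb, Int.toNat_natCast]
      rw [hraroot, hzrb, hrbroot]
      simp [hne, hdra, hdrb]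
    · rw [if_neg hzrb] at hne3 ⊢
      have hlt := h.dstep z hz hne3
      rw [h.pcomp z hz]
      by_cases hb2 : lab z = rb
      · rw [if_pos hb2, if_pos hb2]; omega
      · rw [if_neg hb2, if_neg hb2]; exact hlt
  · intro z hz hl'
    simp only [pvRelab] at hl'
    simp only [pvDmerge]
    by_cases hzrb : lab z = rb
    · rw [if_pos hzrb] at hl'
      exfalso
      rw [← hl'] at hzrb
      rw [hraroot] at hzrb
      exact hne hzrb
    · rw [if_neg hzrb] at hl'
      rw [if_neg hzrb]
      exact h.droot z hz hl'
  · intro z hz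
    simp only [pvRelab, pvDmerge]
    have hb := h.dbound z hz
    by_cases hzrb : lab z = rb
    · simp only [if_pos hzrb]
      rw [GS ra, if_pos rfl]
      rw [hzrb] at hb
      omega
    · simp only [if_neg hzrb]
      rw [GS (lab z)]
      by_cases hzra : lab z = ra
      · rw [if_pos hzra]
        rw [hzra] at hb
        omega
      · rw [if_neg hzra]
        exact hb

-- a sum over range n is unchanged when mass moves between two of its entries
theorem pv_sum_two_update {n : Nat} (F G : Nat → Nat) (ra rb : Nat)
    (hra : ra < n) (hrb : rb < n) (hne : ra ≠ rb)
    (h1 : F ra + F rb = G ra + G rb)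
    (h2 : ∀ j, j < n → j ≠ ra → j ≠ rb → F j = G j) :
    ∑ j ∈ Finset.range n, F j = ∑ j ∈ Finset.range n, G j := by
  have hmem_ra : ra ∈ Finset.range n := Finset.mem_range.mpr hra
  have hmem_rb : rb ∈ (Finset.range n).erase ra := by
    rw [Finset.mem_erase]
    exact ⟨fun hh => hne hh.symm, Finset.mem_range.mpr hrb⟩
  have hre : ∑ j ∈ ((Finset.range n).erase ra).erase rb, F j
      = ∑ j ∈ ((Finset.range n).erase ra).erase rb, G j := by
    refine Finset.sum_congr rfl ?_
    intro j hj
    rw [Finset.mem_erase] at hj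
    obtain ⟨hjrb, hj2⟩ := hj
    rw [Finset.mem_erase] at hj2
    obtain ⟨hjra, hj3⟩ := hj2
    exact h2 j (Finset.mem_range.mp hj3) hjra hjrb
  rw [← Finset.add_sum_erase _ F hmem_ra, ← Finset.add_sum_erase _ F hmem_rb,
    ← Finset.add_sum_erase _ G hmem_ra, ← Finset.add_sum_erase _ G hmem_rb, hre]
  omega

-- the root sum is preserved by a merge
theorem pv_merge_sum {n : Nat} {p2 s : List Int} {lab d2 : Nat → Nat}
    (h : pvUF p2 s lab d2 n) (hsum : pvRootSum p2 s n = n) (ra rb : Nat)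
    (hraroot : lab ra = ra) (hrbroot : lab rb = rb)
    (hra : ra < n) (hrb : rb < n) (hne : ra ≠ rb) :
    pvRootSum (p2.set rb ((ra : Nat) : Int)) (s.set ra (s.getD ra 0 + s.getD rb 0)) n = n := by
  have hrbl : rb < p2.length := h.lenp ▸ hrb
  have hras : ra < s.length := h.lens ▸ hra
  have G3 : ∀ z : Nat, (p2.set rb ((ra : Nat) : Int)).getD z 0
      = if z = rb then ((ra : Nat) : Int) else p2.getD z 0 := fun z => pv_getD_set p2 rb _ z hrbl
  have GS : ∀ z : Nat, (s.set ra (s.getD ra 0 + s.getD rb 0)).getD z 0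
      = if z = ra then s.getD ra 0 + s.getD rb 0 else s.getD z 0 := fun z =>
    pv_getD_set s ra _ z hras
  have hsa : 1 ≤ s.getD ra 0 := by
    have := h.dbound ra hra; rw [hraroot] at this; omega
  have hsb : 1 ≤ s.getD rb 0 := by
    have := h.dbound rb hrb; rw [hrbroot] at this; omega
  have hfra : p2.getD ra 0 = ((ra : Nat) : Int) := by
    have := h.rootfix ra hra; rwa [hraroot] at this
  have hfrb : p2.getD rb 0 = ((rb : Nat) : Int) := by
    have := h.rootfix rb hrb; rwa [hrbroot] at this
  have key := pv_sum_two_update (n := n)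
    (fun j => if (p2.set rb ((ra : Nat) : Int)).getD j 0 = (j : Int)
      then ((s.set ra (s.getD ra 0 + s.getD rb 0)).getD j 0).toNat else 0)
    (fun j => if p2.getD j 0 = (j : Int) then (s.getD j 0).toNat else 0)
    ra rb hra hrb hne ?_ ?_
  · unfold pvRootSum at hsum ⊢
    exact key.trans hsum
  · simp only
    have hnc : ¬ (((ra : Nat) : Int) = ((rb : Nat) : Int)) := by
      intro hh; exact hne (by exact_mod_cast hh)
    have e1 : (p2.set rb ((ra : Nat) : Int)).getD ra 0 = ((ra : Nat) : Int) := by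
      rw [G3 ra, if_neg hne, hfra]
    have e2 : (p2.set rb ((ra : Nat) : Int)).getD rb 0 = ((ra : Nat) : Int) := by
      rw [G3 rb, if_pos rfl]
    have e3 : (s.set ra (s.getD ra 0 + s.getD rb 0)).getD ra 0
        = s.getD ra 0 + s.getD rb 0 := by
      rw [GS ra, if_pos rfl]
    rw [e1, e2, e3, hfra, hfrb, if_neg hnc, if_pos rfl, if_pos rfl, if_pos rfl]
    omega
  · intro j hjn hjra hjrb
    simp only
    rw [G3 j, if_neg hjrb, GS j, if_neg hjra]
-- one combined step: A's union and B's quick-find step agree and keep the invariant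
theorem pv_step {n : Nat} {p s : List Int} {lab d : Nat → Nat} (q : Int × Int)
    (h : pvInv p s lab d n)
    (hq1 : -(n : Int) ≤ q.1 - 1 ∧ q.1 - 1 < n) (hq2 : -(n : Int) ≤ q.2 - 1 ∧ q.2 - 1 < n) :
    ∃ p' s' lab' d' v,
      pvUnionA p s (q.1 - 1) (q.2 - 1) = (p', s', v) ∧
      (∀ out, pvStepB (pvLabList lab n, s, out) q = (pvLabList lab' n, s', out ++ [v])) ∧
      pvInv p' s' lab' d' n := by
  obtain ⟨hUF, hSum⟩ := h
  obtain ⟨p1, d1, hf1, hUF1, hle1, hch1⟩ := pv_find_valid (q.1 - 1) hUF hSum hq1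
  have hSum1 : pvRootSum p1 s n = n := by rw [pv_rootSum_congr hUF hch1]; exact hSum
  obtain ⟨p2, d2, hf2, hUF2, hle2, hch2⟩ := pv_find_valid (q.2 - 1) hUF1 hSum1 hq2
  have hSum2 : pvRootSum p2 s n = n := by rw [pv_rootSum_congr hUF1 hch2]; exact hSum1
  set jx := pvNorm (q.1 - 1) n with hjxd
  set jy := pvNorm (q.2 - 1) n with hjyd
  have hjxn : jx < n := by rw [hjxd]; unfold pvNorm; split <;> omega
  have hjyn : jy < n := by rw [hjyd]; unfold pvNorm; split <;> omega
  set rx := lab jx with hrxd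
  set ry := lab jy with hryd
  have hrxn : rx < n := hUF.labmem jx hjxn
  have hryn : ry < n := hUF.labmem jy hjyn
  have hrxroot : lab rx = rx := hUF.labidem jx hjxn
  have hryroot : lab ry = ry := hUF.labidem jy hjyn
  have hBra : PySem.List.pyGetD (pvLabList lab n) (q.1 - 1) 0 = ((rx : Nat) : Int) :=
    pv_lab_read (q.1 - 1) hq1
  have hBrb : PySem.List.pyGetD (pvLabList lab n) (q.2 - 1) 0 = ((ry : Nat) : Int) :=
    pv_lab_read (q.2 - 1) hq2
  have hsx : PySem.List.pyGetD s ((rx : Nat) : Int) 0 = s.getD rx 0 :=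
    PySem.List.pyGetD_natCast s rx 0
  have hsy : PySem.List.pyGetD s ((ry : Nat) : Int) 0 = s.getD ry 0 :=
    PySem.List.pyGetD_natCast s ry 0
  by_cases hrr : rx = ry
  · -- same root: no merge on either side
    refine ⟨p2, s, lab, d2, PySem.List.pyGetD s ((rx : Nat) : Int) 0, ?_, ?_, hUF2, hSum2⟩
    · unfold pvUnionA
      simp only [hf1, hf2]
      rw [hrr]
      simp
    · intro out
      unfold pvStepB
      simp only [hBra, hBrb]
      rw [if_pos (by rw [hrr])]
  · -- different roots: a merge happens on both sides
    have hcne : ¬ (((rx : Nat) : Int) = ((ry : Nat) : Int)) := by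
      intro hh; exact hrr (by exact_mod_cast hh)
    by_cases hc : PySem.List.pyGetD s ((rx : Nat) : Int) 0 < PySem.List.pyGetD s ((ry : Nat) : Int) 0
    · -- swap: the new root is ry, rx is relabelled
      have hmerge := pv_merge hUF2 ry rx hryroot hrxroot hryn hrxn (fun hh => hrr hh.symm)
      have hmsum := pv_merge_sum hUF2 hSum2 ry rx hryroot hrxroot hryn hrxn (fun hh => hrr hh.symm)
      have hp3 : PySem.List.pySetD p2 ((rx : Nat) : Int) ((ry : Nat) : Int)
          = p2.set rx ((ry : Nat) : Int) := PySem.List.pySetD_natCast p2 rx _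
      have hs1 : PySem.List.pySetD s ((ry : Nat) : Int)
            (PySem.List.pyGetD s ((ry : Nat) : Int) 0 + PySem.List.pyGetD s ((rx : Nat) : Int) 0)
          = s.set ry (s.getD ry 0 + s.getD rx 0) := by
        rw [hsx, hsy, PySem.List.pySetD_natCast]
      refine ⟨PySem.List.pySetD p2 ((rx : Nat) : Int) ((ry : Nat) : Int),
        PySem.List.pySetD s ((ry : Nat) : Int)
          (PySem.List.pyGetD s ((ry : Nat) : Int) 0 + PySem.List.pyGetD s ((rx : Nat) : Int) 0),
        pvRelab lab ry rx, pvDmerge d2 lab rx,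
        PySem.List.pyGetD (PySem.List.pySetD s ((ry : Nat) : Int)
          (PySem.List.pyGetD s ((ry : Nat) : Int) 0 + PySem.List.pyGetD s ((rx : Nat) : Int) 0))
          ((ry : Nat) : Int) 0, ?_, ?_, ?_⟩
      · unfold pvUnionA
        simp only [hf1, hf2]
        rw [if_pos hcne]
        simp only [if_pos hc]
      · intro out
        unfold pvStepB
        simp only [hBra, hBrb]
        rw [if_neg hcne]
        simp only [if_pos hc]
        have hmap : (pvLabList lab n).map
            (fun v => if v = ((rx : Nat) : Int) then ((ry : Nat) : Int) else v)
            = pvLabList (pvRelab lab ry rx) n := by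
          unfold pvLabList pvRelab
          rw [List.map_map]
          apply List.map_congr_left
          intro j _
          simp only [Function.comp]
          by_cases hl : lab j = rx
          · rw [if_pos (by exact_mod_cast hl), if_pos hl]
          · rw [if_neg (fun hh => hl (by exact_mod_cast hh)), if_neg hl]
        rw [hmap]
      · rw [hp3, hs1]
        exact ⟨hmerge, hmsum⟩
    · -- no swap: the new root is rx, ry is relabelled
      have hmerge := pv_merge hUF2 rx ry hrxroot hryroot hrxn hryn hrr
      have hmsum := pv_merge_sum hUF2 hSum2 rx ry hrxroot hryroot hrxn hryn hrr
      have hp3 : PySem.List.pySetD p2 ((ry : Nat) : Int) ((rx : Nat) : Int)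
          = p2.set ry ((rx : Nat) : Int) := PySem.List.pySetD_natCast p2 ry _
      have hs1 : PySem.List.pySetD s ((rx : Nat) : Int)
            (PySem.List.pyGetD s ((rx : Nat) : Int) 0 + PySem.List.pyGetD s ((ry : Nat) : Int) 0)
          = s.set rx (s.getD rx 0 + s.getD ry 0) := by
        rw [hsx, hsy, PySem.List.pySetD_natCast]
      refine ⟨PySem.List.pySetD p2 ((ry : Nat) : Int) ((rx : Nat) : Int),
        PySem.List.pySetD s ((rx : Nat) : Int)
          (PySem.List.pyGetD s ((rx : Nat) : Int) 0 + PySem.List.pyGetD s ((ry : Nat) : Int) 0),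
        pvRelab lab rx ry, pvDmerge d2 lab ry,
        PySem.List.pyGetD (PySem.List.pySetD s ((rx : Nat) : Int)
          (PySem.List.pyGetD s ((rx : Nat) : Int) 0 + PySem.List.pyGetD s ((ry : Nat) : Int) 0))
          ((rx : Nat) : Int) 0, ?_, ?_, ?_⟩
      · unfold pvUnionA
        simp only [hf1, hf2]
        rw [if_pos hcne]
        simp only [if_neg hc]
      · intro out
        unfold pvStepB
        simp only [hBra, hBrb]
        rw [if_neg hcne]
        simp only [if_neg hc]
        have hmap : (pvLabList lab n).map
            (fun v => if v = ((ry : Nat) : Int) then ((rx : Nat) : Int) else v)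
            = pvLabList (pvRelab lab rx ry) n := by
          unfold pvLabList pvRelab
          rw [List.map_map]
          apply List.map_congr_left
          intro j _
          simp only [Function.comp]
          by_cases hl : lab j = ry
          · rw [if_pos (by exact_mod_cast hl), if_pos hl]
          · rw [if_neg (fun hh => hl (by exact_mod_cast hh)), if_neg hl]
        rw [hmap]
      · rw [hp3, hs1]
        exact ⟨hmerge, hmsum⟩

-- the two loops produce the same result list
theorem pv_loop {n : Nat} (qs : List (Int × Int)) :
    ∀ (p s : List Int) (lab d : Nat → Nat) (out : List Int),
    pvInv p s lab d n →
    (∀ q ∈ qs, (-(n : Int) ≤ q.1 - 1 ∧ q.1 - 1 < n) ∧ (-(n : Int) ≤ q.2 - 1 ∧ q.2 - 1 < n)) →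
    (qs.foldl pvStepA (p, s, out)).2.2 = (qs.foldl pvStepB (pvLabList lab n, s, out)).2.2 := by
  induction qs with
  | nil => intro p s lab d out _ _; rfl
  | cons q qs ih =>
    intro p s lab d out hInv hval
    obtain ⟨hv1, hv2⟩ := hval q List.mem_cons_self
    obtain ⟨p', s', lab', d', v, hA, hB, hInv'⟩ := pv_step q hInv hv1 hv2
    have hstepA : pvStepA (p, s, out) q = (p', s', out ++ [v]) := by
      unfold pvStepA
      simp only [hA]
    rw [List.foldl_cons, List.foldl_cons, hstepA, hB out]
    exact ih p' s' lab' d' (out ++ [v]) hInv' (fun r hr => hval r (List.mem_cons_of_mem _ hr))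
-- the initial state satisfies the invariant
theorem pv_init (n : Nat) :
    pvInv (pvLabList (fun j => j) n) (List.replicate n (1 : Int)) (fun j => j) (fun _ => 0) n := by
  have hget : ∀ j, j < n → (pvLabList (fun j => j) n).getD j 0 = (j : Int) := fun j hj =>
    pv_labList_getD (fun j => j) n j hj
  have hrep : ∀ j, j < n → (List.replicate n (1 : Int)).getD j 0 = 1 := by
    intro j hj
    rw [List.getD_eq_getElem _ _ (by simpa using hj), List.getElem_replicate]
  constructor
  · constructor
    · exact pv_labList_length _ n
    · exact List.length_replicate
    · intro j hj; rw [hget j hj]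
      constructor
      · exact Int.natCast_nonneg _
      · exact_mod_cast hj
    · intro j hj
      show ((pvLabList (fun j => j) n).getD j 0).toNat = j
      rw [hget j hj]
      simp
    · intro j hj; exact hj
    · intro j hj; rfl
    · intro j hj
      show (pvLabList (fun j => j) n).getD j 0 = (j : Int)
      exact hget j hj
    · intro j hj _; rfl
    · intro j hj hne; exact absurd (hget j hj) hne
    · intro j hj _; rfl
    · intro j hj
      show (0 : Nat) < ((List.replicate n (1 : Int)).getD j 0).toNat
      rw [hrep j hj]
      omega
  · unfold pvRootSum
    have hone : ∀ j ∈ Finset.range n,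
        (if (pvLabList (fun j => j) n).getD j 0 = (j : Int)
          then ((List.replicate n (1 : Int)).getD j 0).toNat else 0) = 1 := by
      intro j hj
      have hj' : j < n := Finset.mem_range.mp hj
      rw [hget j hj', if_pos rfl, hrep j hj']
      rfl
    calc ∑ j ∈ Finset.range n,
          (if (pvLabList (fun j => j) n).getD j 0 = (j : Int)
            then ((List.replicate n (1 : Int)).getD j 0).toNat else 0)
        = ∑ _j ∈ Finset.range n, 1 := Finset.sum_congr rfl hone
      _ = n := by simp

-- ===== VERDICT (by name: the statement is the Claim_ definition above) =====
theorem friend_circle_size_spec : Claim_equal_friend_circle_size := by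
  intro N K qs _ hPre
  unfold Spec_friend_circle_size friend_circle_size friend_circle_size_alt
  have hinit : PySem.List.pyRange 0 N 1 = pvLabList (fun j => j) N.toNat := by
    rw [PySem.List.pyRange_one]
    unfold pvLabList
    simp
  rw [hinit]
  apply pv_loop (n := N.toNat) qs _ _ (fun j => j) (fun _ => 0) [] (pv_init N.toNat)
  intro q hq
  obtain ⟨⟨ha1, ha2⟩, hb1, hb2⟩ := hPre q hq
  have hN : 1 ≤ N := by omega
  refine ⟨⟨?_, ?_⟩, ?_, ?_⟩ <;> omega
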